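-- pv_equiv track=rewrite | github.com/ouvh/MAP_TO_GRAPH | image_analyser/test.py | border_organiser
-- ===== SOURCE A (Python) =====
-- def border_organiser(new,old):
--     inf = 0
--     sup = 0
--     p = []
--     for i in range(len(old)):
--         if not old[i] in new:
--             inf = i
--             break
--     for i in range(inf,len(old)):
--         if old[i] in new:
--             sup = i
--             break
--
--     for i in range(sup,len(old)):
--         if old[i] in new:
--             p.append(old[i])
--     for i in range(inf):
--         if old[i] in new:
--             p.append(old[i])
--     return p
-- ===== SOURCE B (Python) =====
-- def border_organiser(new, old):
--     filtered = [x for x in old if x in new]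
--     inf = 0
--     for i, x in enumerate(old):
--         if x not in new:
--             inf = i
--             break
--     return filtered[inf:] + filtered[:inf]
-- ===== Notes on version B (the rewrite author's own statement) =====
-- stated objective: simpler
-- what changed: B filters old once and rotates the filtered list at the index of old's first element not in new, replacing A's two pivot-index scans and two index-loop append passes.
-- intended difference: When old starts with elements of new but no element of new occurs at or after old's first non-member, A's sup pivot stays 0 so A appends the leading run twice (e.g. [1,1] for new=[1], old=[1,2]) while B returns it once ([1]), the intended rotation. — e.g. on border_organiser([1], [1, 2]): A returns [1, 1], B returns [1]
import Mathlib
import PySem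

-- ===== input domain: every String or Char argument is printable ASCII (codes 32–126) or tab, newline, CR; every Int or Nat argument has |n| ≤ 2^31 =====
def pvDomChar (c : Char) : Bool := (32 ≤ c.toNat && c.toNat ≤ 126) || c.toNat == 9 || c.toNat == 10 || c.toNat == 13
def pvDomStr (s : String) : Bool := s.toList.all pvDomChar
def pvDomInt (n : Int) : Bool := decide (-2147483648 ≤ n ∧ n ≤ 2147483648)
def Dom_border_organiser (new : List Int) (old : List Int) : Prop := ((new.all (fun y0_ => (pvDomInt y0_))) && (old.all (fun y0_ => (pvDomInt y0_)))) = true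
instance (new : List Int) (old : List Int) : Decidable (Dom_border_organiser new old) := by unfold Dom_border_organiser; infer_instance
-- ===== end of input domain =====

-- B filters once and rotates at the first-non-member index instead of A's two pivot
-- scans plus two append loops (objective: simpler); on the D_ corner below B fixes
-- A's doubled output.

-- ===== PORT A =====
-- first loop: scan for first index i with old[i] not in new (inf stays 0 if none)
def pvScanInf (new old : List Int) (i : Nat) : Nat :=
  if h : i < old.length then
    if old[i] ∈ new then pvScanInf new old (i + 1) else i
  else 0
termination_by old.length - i

-- second loop: scan from inf for first index i with old[i] in new (sup stays 0 if none)
def pvScanSup (new old : List Int) (i : Nat) : Nat :=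
  if h : i < old.length then
    if old[i] ∈ new then i else pvScanSup new old (i + 1)
  else 0
termination_by old.length - i

-- the two append loops; old.getD i 0 is exact: every i drawn from the range is in bounds
def border_organiser (new : List Int) (old : List Int) : List Int :=
  let inf := pvScanInf new old 0
  let sup := pvScanSup new old inf
  let p := (List.range' sup (old.length - sup)).foldl
      (fun p i => if old.getD i 0 ∈ new then p ++ [old.getD i 0] else p) []
  (List.range' 0 inf).foldl
      (fun p i => if old.getD i 0 ∈ new then p ++ [old.getD i 0] else p) p

-- ===== PORT B =====
-- for i, x in enumerate(old): if x not in new: inf = i; break   (inf stays 0 if none)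
def pvAltInf (new : List Int) : List Int → Nat → Nat
  | [], _ => 0
  | x :: xs, i => if x ∈ new then pvAltInf new xs (i + 1) else i

-- filtered[inf:] + filtered[:inf]; drop/take are exact for the nonnegative index inf
def border_organiser_alt (new : List Int) (old : List Int) : List Int :=
  let filtered := old.filter (fun x => decide (x ∈ new))
  let inf := pvAltInf new old 0
  filtered.drop inf ++ filtered.take inf

-- ===== PRECONDITION & SPEC =====
-- When old starts with elements of new but no element of new occurs at or after old's
-- first non-member, A's sup pivot stays 0 so A appends the leading run twice, while B
-- returns it once — the intended rotation.
def D_border_organiser (new : List Int) (old : List Int) : Prop :=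
  let t := old.takeWhile (fun x => decide (x ∈ new))
  t ≠ [] ∧ t.length < old.length ∧ ∀ x ∈ old.drop t.length, x ∉ new
instance (new : List Int) (old : List Int) : Decidable (D_border_organiser new old) := by
  unfold D_border_organiser; infer_instance

def Spec_border_organiser (new : List Int) (old : List Int) (out : List Int) : Prop :=
  ¬ D_border_organiser new old → out = border_organiser_alt new old
instance (new : List Int) (old : List Int) (out : List Int) : Decidable (Spec_border_organiser new old out) := by
  unfold Spec_border_organiser; infer_instance

def pvDiffWitness_border_organiser : List Int × List Int := ([1], [1, 2])
def pvDiffWitnessOut_border_organiser : (List Int) × (List Int) := ([1, 1], [1])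

-- ===== CLAIM (what is proved, stated in full; the proofs are below) =====
def Claim_unchanged_border_organiser : Prop := ∀ (new : List Int) (old : List Int), Dom_border_organiser new old → Spec_border_organiser new old (border_organiser new old)
def Claim_changed_border_organiser : Prop := Dom_border_organiser (pvDiffWitness_border_organiser.1) (pvDiffWitness_border_organiser.2) ∧ D_border_organiser (pvDiffWitness_border_organiser.1) (pvDiffWitness_border_organiser.2) ∧ border_organiser (pvDiffWitness_border_organiser.1) (pvDiffWitness_border_organiser.2) = pvDiffWitnessOut_border_organiser.1 ∧ border_organiser_alt (pvDiffWitness_border_organiser.1) (pvDiffWitness_border_organiser.2) = pvDiffWitnessOut_border_organiser.2 ∧ pvDiffWitnessOut_border_organiser.1 ≠ pvDiffWitnessOut_border_organiser.2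
def Claim_exact_border_organiser : Prop := ∀ (new : List Int) (old : List Int), Dom_border_organiser new old → D_border_organiser new old → border_organiser new old ≠ border_organiser_alt new old

-- ===== LEMMAS AND PROOFS =====

lemma pvAltInf_eq (new xs : List Int) (i : Nat) :
    pvAltInf new xs i =
      if (xs.takeWhile (fun x => decide (x ∈ new))).length < xs.length
      then i + (xs.takeWhile (fun x => decide (x ∈ new))).length else 0 := by
  induction xs generalizing i with
  | nil => simp [pvAltInf]
  | cons x xs ih =>
    by_cases hx : x ∈ new
    · rw [show pvAltInf new (x :: xs) i = pvAltInf new xs (i + 1) by simp [pvAltInf, hx], ih]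
      simp only [List.takeWhile_cons, hx, decide_true, if_true, List.length_cons]
      split_ifs <;> omega
    · simp [pvAltInf, hx]

lemma pvScanInf_eq_alt (new old : List Int) (i : Nat) (h : i ≤ old.length) :
    pvScanInf new old i = pvAltInf new (old.drop i) i := by
  fun_induction pvScanInf new old i with
  | case1 i hi hm ih =>
    rw [ih (by omega)]
    rw [show old.drop i = old[i] :: old.drop (i + 1) from (List.getElem_cons_drop hi).symm]
    simp [pvAltInf, hm]
  | case2 i hi hm =>
    rw [show old.drop i = old[i] :: old.drop (i + 1) from (List.getElem_cons_drop hi).symm]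
    simp [pvAltInf, hm]
  | case3 i hi =>
    have : i = old.length := by omega
    simp [this, pvAltInf]

lemma pvScanSup_eq (new old : List Int) (i : Nat) (h : i ≤ old.length) :
    pvScanSup new old i =
      if ((old.drop i).takeWhile (fun x => decide (x ∉ new))).length < (old.drop i).length
      then i + ((old.drop i).takeWhile (fun x => decide (x ∉ new))).length else 0 := by
  fun_induction pvScanSup new old i with
  | case1 i hi hm =>
    rw [show old.drop i = old[i] :: old.drop (i + 1) from (List.getElem_cons_drop hi).symm]
    have hc : (decide (old[i] ∉ new)) = false := by simp [hm]
    simp only [List.takeWhile_cons, hc, Bool.false_eq_true, if_false, List.length_nil,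
      List.length_cons]
    rw [if_pos (by omega)]
    omega
  | case2 i hi hm ih =>
    rw [ih (by omega)]
    rw [show old.drop i = old[i] :: old.drop (i + 1) from (List.getElem_cons_drop hi).symm]
    have hc : (decide (old[i] ∉ new)) = true := by simp [hm]
    simp only [List.takeWhile_cons, hc, if_true, List.length_cons]
    split_ifs <;> omega
  | case3 i hi =>
    have : i = old.length := by omega
    simp [this]

lemma fold_filter (new old : List Int) (s n : Nat) (h : s + n ≤ old.length) (init : List Int) :
    (List.range' s n).foldl
        (fun p i => if old.getD i 0 ∈ new then p ++ [old.getD i 0] else p) init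
      = init ++ ((old.drop s).take n).filter (fun x => decide (x ∈ new)) := by
  induction n generalizing s init with
  | zero => simp
  | succ n ih =>
    rw [List.range'_succ, List.foldl_cons]
    have hs : s < old.length := by omega
    have hget : old.getD s 0 = old[s] := by
      simp [List.getD, List.getElem?_eq_getElem hs]
    have hdrop : old.drop s = old[s] :: old.drop (s + 1) := (List.getElem_cons_drop hs).symm
    rw [hdrop, List.take_succ_cons, hget]
    by_cases hm : old[s] ∈ new
    · rw [if_pos hm, ih (s + 1) (by omega)]
      simp [hm]
    · rw [if_neg hm, ih (s + 1) (by omega)]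
      simp [hm]

lemma takeWhile_filter_self (new t : List Int)
    (ht : ∀ x ∈ t, x ∈ new) : t.filter (fun x => decide (x ∈ new)) = t := by
  rw [List.filter_eq_self]
  intro x hx; simpa using ht x hx

lemma take_takeWhile_len (old : List Int) (p : Int → Bool) :
    old.take (old.takeWhile p).length = old.takeWhile p :=
  (List.prefix_iff_eq_take.mp (List.takeWhile_prefix p)).symm

-- A's result in closed form: filter of the tail from sup, then filter of the prefix before inf
lemma border_organiser_closed (new old : List Int) :
    border_organiser new old =
      ((old.drop (pvScanSup new old (pvScanInf new old 0))).filter (fun x => decide (x ∈ new)))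
        ++ ((old.take (pvScanInf new old 0)).filter (fun x => decide (x ∈ new))) := by
  have htw := (List.takeWhile_prefix (l := old) (fun x => decide (x ∈ new))).length_le
  have hinf_le : pvScanInf new old 0 ≤ old.length := by
    rw [pvScanInf_eq_alt new old 0 (by omega), pvAltInf_eq]
    simp only [List.drop_zero]
    split_ifs <;> omega
  have hsup_le : pvScanSup new old (pvScanInf new old 0) ≤ old.length := by
    rw [pvScanSup_eq new old _ hinf_le]
    have h2 := (List.takeWhile_prefix (l := old.drop (pvScanInf new old 0))
      (fun x => decide (x ∉ new))).length_le
    simp only [List.length_drop] at h2 ⊢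
    split_ifs <;> omega
  show (List.range' 0 (pvScanInf new old 0)).foldl
        (fun p i => if old.getD i 0 ∈ new then p ++ [old.getD i 0] else p)
        ((List.range' (pvScanSup new old (pvScanInf new old 0))
            (old.length - pvScanSup new old (pvScanInf new old 0))).foldl
          (fun p i => if old.getD i 0 ∈ new then p ++ [old.getD i 0] else p) [])
      = _
  rw [fold_filter new old _ _ (by omega) [],
      fold_filter new old 0 _ (by omega : 0 + pvScanInf new old 0 ≤ old.length)]
  rw [List.take_of_length_le (by simp), List.drop_zero, List.nil_append]

-- B's result in closed form (just unfolding the lets)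
lemma border_organiser_alt_closed (new old : List Int) :
    border_organiser_alt new old =
      (old.filter (fun x => decide (x ∈ new))).drop (pvAltInf new old 0)
        ++ (old.filter (fun x => decide (x ∈ new))).take (pvAltInf new old 0) := rfl

-- ===== VERDICT (by name: the statement is the Claim_ definition above) =====
theorem border_organiser_spec : Claim_unchanged_border_organiser := by
  intro new old _ hD
  have hinf0 : pvScanInf new old 0 = pvAltInf new old 0 := by
    rw [pvScanInf_eq_alt new old 0 (by omega), List.drop_zero]
  rw [border_organiser_closed, border_organiser_alt_closed, hinf0]
  have htw := (List.takeWhile_prefix (l := old) (fun x => decide (x ∈ new))).length_le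
  by_cases hlt : (old.takeWhile (fun x => decide (x ∈ new))).length < old.length
  · -- a non-member exists; inf = t.length
    set t := old.takeWhile (fun x => decide (x ∈ new)) with ht
    have hinf : pvAltInf new old 0 = t.length := by
      rw [pvAltInf_eq, if_pos hlt, Nat.zero_add, ht]
    rw [hinf]
    set r := old.drop t.length with hr
    set u := r.takeWhile (fun x => decide (x ∉ new)) with hu
    have htake : old.take t.length = t := take_takeWhile_len old _
    have hft : t.filter (fun x => decide (x ∈ new)) = t :=
      takeWhile_filter_self new t (fun x hx => by
        have := List.mem_takeWhile_imp (ht ▸ hx); simpa using this)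
    have hfilter_old : old.filter (fun x => decide (x ∈ new))
        = t ++ r.filter (fun x => decide (x ∈ new)) := by
      conv_lhs => rw [← List.take_append_drop t.length old, htake]
      rw [List.filter_append, hft, ← hr]
    by_cases hu_lt : u.length < r.length
    · -- a member exists after inf: sup = t.length + u.length
      have hsup : pvScanSup new old t.length = t.length + u.length := by
        rw [pvScanSup_eq new old t.length (by omega), ← hr, ← hu, if_pos hu_lt]
      have hfu : u.filter (fun x => decide (x ∈ new)) = [] := by
        rw [List.filter_eq_nil_iff]
        intro x hx
        have := List.mem_takeWhile_imp (hu ▸ hx)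
        simpa using this
      have hdrop_sup : old.drop (t.length + u.length) = r.drop u.length := by
        rw [← List.drop_drop, ← hr]
      have hfr : r.filter (fun x => decide (x ∈ new))
          = (r.drop u.length).filter (fun x => decide (x ∈ new)) := by
        conv_lhs => rw [show r = u ++ r.drop u.length by
          conv_lhs => rw [← List.take_append_drop u.length r]
          rw [show r.take u.length = u from take_takeWhile_len r _]]
        rw [List.filter_append, hfu, List.nil_append]
      rw [hsup, hdrop_sup, htake, hft, hfilter_old, hfr, List.drop_left, List.take_left]
    · -- no member at or after inf: ¬D forces t = [], both sides are []
      have hur : u = r := by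
        rw [hu]
        refine List.IsPrefix.eq_of_length (List.takeWhile_prefix _) ?_
        have h2 := (List.takeWhile_prefix (l := r) (fun x => decide (x ∉ new))).length_le
        have h3 : ¬ (r.takeWhile (fun x => decide (x ∉ new))).length < r.length := by
          rw [← hu]; exact hu_lt
        omega
      have hall : ∀ x ∈ r, x ∉ new := by
        intro x hx
        have := List.mem_takeWhile_imp (hu ▸ hur ▸ hx : x ∈ r.takeWhile _)
        simpa using this
      have hteq : t = [] := by
        by_contra hne
        exact hD ⟨hne, hlt, hall⟩
      have hfr : r.filter (fun x => decide (x ∈ new)) = [] := by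
        rw [List.filter_eq_nil_iff]
        intro x hx; simpa using hall x hx
      have hsup : pvScanSup new old t.length = 0 := by
        rw [pvScanSup_eq new old t.length (by omega), ← hr, ← hu, hur]
        simp
      rw [hsup, hfilter_old, hfr, hteq]
      simp only [List.drop_zero, List.length_nil, List.take_zero, List.append_nil,
        List.filter_nil]
      rw [List.filter_eq_nil_iff]
      intro a ha
      simpa using hall a (by simpa [hr, hteq] using ha)
  · -- every element of old is in new: inf = 0, sup = 0, both sides = filter old
    have hinf : pvAltInf new old 0 = 0 := by
      rw [pvAltInf_eq, if_neg hlt]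
    have hto : old.takeWhile (fun x => decide (x ∈ new)) = old :=
      List.IsPrefix.eq_of_length (List.takeWhile_prefix _) (by omega)
    have hallmem : ∀ x ∈ old, x ∈ new := fun x hx => by
      have := List.mem_takeWhile_imp (hto ▸ hx : x ∈ old.takeWhile _)
      simpa using this
    have hsup : pvScanSup new old 0 = 0 := by
      rw [pvScanSup_eq new old 0 (by omega), List.drop_zero]
      cases old with
      | nil => simp
      | cons y ys =>
        have hy : (decide (y ∉ new)) = false := by simp [hallmem y (by simp)]
        simp only [List.takeWhile_cons, hy, Bool.false_eq_true, if_false, List.length_nil,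
          List.length_cons]
        rw [if_pos (by omega)]
    rw [hinf, hsup]
    simp only [List.drop_zero, List.take_zero, List.filter_nil, List.append_nil]

theorem border_organiser_changed : Claim_changed_border_organiser := by
  unfold Claim_changed_border_organiser
  refine ⟨by decide, by decide, ?_, by decide, by decide⟩
  show border_organiser [1] [1, 2] = [1, 1]
  have h1 : pvScanInf [1] [1, 2] 0 = 1 := by
    rw [pvScanInf_eq_alt [1] [1, 2] 0 (by simp)]
    decide
  rw [border_organiser_closed, h1]
  have h2 : pvScanSup [1] [1, 2] 1 = 0 := by
    rw [pvScanSup_eq [1] [1, 2] 1 (by simp)]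
    decide
  rw [h2]
  decide

theorem border_organiser_tight : Claim_exact_border_organiser := by
  intro new old _ hDd
  obtain ⟨hne, hlt, hall⟩ := hDd
  have hinf0 : pvScanInf new old 0 = pvAltInf new old 0 := by
    rw [pvScanInf_eq_alt new old 0 (by omega), List.drop_zero]
  rw [border_organiser_closed, border_organiser_alt_closed, hinf0]
  set t := old.takeWhile (fun x => decide (x ∈ new)) with ht
  have hinf : pvAltInf new old 0 = t.length := by
    rw [pvAltInf_eq, if_pos hlt, Nat.zero_add, ht]
  set r := old.drop t.length with hr
  have htake : old.take t.length = t := take_takeWhile_len old _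
  have hft : t.filter (fun x => decide (x ∈ new)) = t :=
    takeWhile_filter_self new t (fun x hx => by
      have := List.mem_takeWhile_imp (ht ▸ hx); simpa using this)
  have hfr : r.filter (fun x => decide (x ∈ new)) = [] := by
    rw [List.filter_eq_nil_iff]
    intro x hx; simpa using hall x (hr ▸ hx)
  have hfilter_old : old.filter (fun x => decide (x ∈ new)) = t := by
    conv_lhs => rw [← List.take_append_drop t.length old, htake]
    rw [List.filter_append, hft, ← hr, hfr, List.append_nil]
  have hur : r.takeWhile (fun x => decide (x ∉ new)) = r := by
    rw [List.takeWhile_eq_self_iff]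
    intro x hx; simpa using hall x (hr ▸ hx)
  have hsup : pvScanSup new old t.length = 0 := by
    rw [pvScanSup_eq new old t.length (by
        have := (List.takeWhile_prefix (l := old) (fun x => decide (x ∈ new))).length_le
        omega), ← hr, hur]
    simp
  rw [hinf, hsup, List.drop_zero, htake, hft, hfilter_old,
      List.drop_of_length_le (le_refl t.length), List.take_of_length_le (le_refl t.length),
      List.nil_append]
  intro hcontra
  have hlen : (t ++ t).length = t.length := by rw [hcontra]
  simp at hlen
  exact hne hlen
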